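-- pv_equiv track=rewrite | github.com/ZurichNLP/simplewiki-data-acquisition | misc/extract_images.py | extract_caption
-- ===== SOURCE A (Python) =====
-- def extract_caption(line: str) -> str:
--     """
--     extracts the last field (potential image caption) of an input string of form "text|text|text]]"
--
--     Args:
--         line    the input line
--
--     Returns:
--                 the last field
--     """
--     brackets = 2
--     curr_field = ""
--     for char in line:
--         if char == "]":
--             brackets -= 1
--             if brackets == 0:
--                 return curr_field
--         elif char == "[":
--             brackets += 1
--         elif char == "|":
--             curr_field = ""
--         else:
--             curr_field += char
--     return ""
-- ===== SOURCE B (Python) =====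
-- def extract_caption(line: str) -> str:
--     # pass 1: find the closing ']' where bracket depth (starting at 2) reaches 0
--     depth = 2
--     cut = None
--     for i, ch in enumerate(line):
--         if ch == '[':
--             depth += 1
--         elif ch == ']':
--             depth -= 1
--             if depth == 0:
--                 cut = i
--                 break
--     if cut is None:
--         return ""
--     # pass 2: walk backwards from the cut, collecting non-bracket chars until a '|'
--     field = []
--     for c in reversed(line[:cut]):
--         if c == '|':
--             break
--         if c != '[' and c != ']':
--             field.append(c)
--     return ''.join(reversed(field))
-- ===== Notes on version B (the rewrite author's own statement) =====
-- stated objective: alternative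
-- what changed: A's single accumulate-and-reset forward scan is replaced by a locate-then-extract pair: one forward scan only tracks depth to find the closing bracket's index, then a short backward walk from the cut collects the last field directly (stopping at the first '|' from the right); the constant-factor win is that no per-character string accumulation/resetting happens during the main scan.
import Mathlib
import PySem

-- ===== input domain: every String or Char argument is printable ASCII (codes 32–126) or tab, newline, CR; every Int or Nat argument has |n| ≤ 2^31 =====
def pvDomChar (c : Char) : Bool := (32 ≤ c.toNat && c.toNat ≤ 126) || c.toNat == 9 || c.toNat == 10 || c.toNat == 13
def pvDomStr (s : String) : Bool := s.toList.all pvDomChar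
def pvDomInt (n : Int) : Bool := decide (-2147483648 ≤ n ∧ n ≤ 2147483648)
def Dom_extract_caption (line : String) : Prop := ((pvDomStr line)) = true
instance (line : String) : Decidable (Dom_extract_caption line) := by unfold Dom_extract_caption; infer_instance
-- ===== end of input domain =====

-- B replaces A's accumulate-and-reset forward scan by a depth-only locate pass plus a backward
-- extraction walk; same value on every input (objective: alternative decomposition, same cost).

-- ===== PORT A =====
-- A's loop: state (brackets, curr_field); returns curr_field when depth hits 0, "" at end of line.
def extractCaptionGoA : List Char → Int → List Char → List Char
  | [], _, _ => []
  | c :: cs, brackets, cur =>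
    if c = ']' then
      (if brackets - 1 = 0 then cur else extractCaptionGoA cs (brackets - 1) cur)
    else if c = '[' then extractCaptionGoA cs (brackets + 1) cur
    else if c = '|' then extractCaptionGoA cs brackets []
    else extractCaptionGoA cs brackets (cur ++ [c])

def extract_caption (line : String) : String :=
  String.ofList (extractCaptionGoA line.toList 2 [])

-- ===== PORT B =====
-- pass 1 of Source B: 'for i, ch in enumerate(line)' tracking depth; i is the running index.
def extractCaptionFindCut : List Char → Int → Nat → Option Nat
  | [], _, _ => none
  | ch :: rest, depth, i =>
    if ch = '[' then extractCaptionFindCut rest (depth + 1) (i + 1)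
    else if ch = ']' then
      (if depth - 1 = 0 then some i else extractCaptionFindCut rest (depth - 1) (i + 1))
    else extractCaptionFindCut rest depth (i + 1)

-- pass 2 of Source B: 'for c in reversed(line[:cut])', appending to field, break on '|'.
def extractCaptionGoB : List Char → List Char → List Char
  | [], field => field
  | c :: rest, field =>
    if c = '|' then field
    else if c ≠ '[' ∧ c ≠ ']' then extractCaptionGoB rest (field ++ [c])
    else extractCaptionGoB rest field

def extract_caption_alt (line : String) : String :=
  match extractCaptionFindCut line.toList 2 0 with
  | none => ""
  | some cut =>
    -- line[:cut] reversed, walked left to right = the backward index walk of Source B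
    let region := PySem.List.slice line.toList none (some (cut : Int))
    String.ofList (extractCaptionGoB region.reverse []).reverse

-- ===== PRECONDITION & SPEC =====
def Spec_extract_caption (line : String) (out : String) : Prop := out = extract_caption_alt line
instance (line : String) (out : String) : Decidable (Spec_extract_caption line out) := by unfold Spec_extract_caption; infer_instance

-- ===== CLAIM (what is proved, stated in full; the proofs are below) =====
def Claim_equal_extract_caption : Prop := ∀ (line : String), Dom_extract_caption line → Spec_extract_caption line (extract_caption line)

-- ===== LEMMAS AND PROOFS =====

-- goB over a list of plain chars just appends them all
lemma goB_plain (xs : List Char) (acc : List Char)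
    (h : ∀ c ∈ xs, c ≠ '|' ∧ c ≠ '[' ∧ c ≠ ']') :
    extractCaptionGoB xs acc = acc ++ xs := by
  induction xs generalizing acc with
  | nil => simp [extractCaptionGoB]
  | cons c cs ih =>
    obtain ⟨h1, h2, h3⟩ := h c (by simp)
    rw [show extractCaptionGoB (c :: cs) acc = extractCaptionGoB cs (acc ++ [c]) by
      simp [extractCaptionGoB, h1, h2, h3]]
    rw [ih _ (fun c hc => h c (by simp [hc]))]
    simp

-- goB stops at a '|' (whether or not one occurs earlier)
lemma goB_bar (xs ys acc : List Char) :
    extractCaptionGoB (xs ++ '|' :: ys) acc = extractCaptionGoB xs acc := by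
  induction xs generalizing acc with
  | nil => simp [extractCaptionGoB]
  | cons c cs ih =>
    by_cases h1 : c = '|'
    · simp [extractCaptionGoB, h1]
    · by_cases h2 : c ≠ '[' ∧ c ≠ ']'
      · simp [extractCaptionGoB, h1, h2, ih]
      · simp [extractCaptionGoB, h1, h2, ih]

-- goB ignores a bracket character anywhere
lemma goB_skip (b : Char) (hb : b = '[' ∨ b = ']') (xs ys acc : List Char) :
    extractCaptionGoB (xs ++ b :: ys) acc = extractCaptionGoB (xs ++ ys) acc := by
  induction xs generalizing acc with
  | nil =>
    have hbar : b ≠ '|' := by rcases hb with h | h <;> simp [h]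
    have hbr : ¬ (b ≠ '[' ∧ b ≠ ']') := by rcases hb with h | h <;> simp [h]
    simp [extractCaptionGoB, hbar, hbr]
  | cons c cs ih =>
    by_cases h1 : c = '|'
    · simp [extractCaptionGoB, h1]
    · by_cases h2 : c ≠ '[' ∧ c ≠ ']'
      · simp [extractCaptionGoB, h1, h2, ih]
      · simp [extractCaptionGoB, h1, h2, ih]

-- the index accumulator of findCut only shifts the result
lemma findCut_shift (cs : List Char) : ∀ (d : Int) (i : Nat),
    extractCaptionFindCut cs d i = (extractCaptionFindCut cs d 0).map (· + i) := by
  induction cs with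
  | nil => intro d i; simp [extractCaptionFindCut]
  | cons c cs ih =>
    intro d i
    by_cases h1 : c = '['
    · simp only [extractCaptionFindCut, if_pos h1]
      rw [ih (d + 1) (i + 1), ih (d + 1) 1]
      cases extractCaptionFindCut cs (d + 1) 0 <;> simp <;> try omega
    · by_cases h2 : c = ']'
      · by_cases h3 : d - 1 = 0
        · simp [extractCaptionFindCut, h2, h3]
        · simp only [extractCaptionFindCut, if_neg h1, if_pos h2, if_neg h3]
          rw [ih (d - 1) (i + 1), ih (d - 1) 1]
          cases extractCaptionFindCut cs (d - 1) 0 <;> simp <;> try omega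
      · simp only [extractCaptionFindCut, if_neg h1, if_neg h2]
        rw [ih d (i + 1), ih d 1]
        cases extractCaptionFindCut cs d 0 <;> simp <;> try omega

-- main invariant: A's loop equals locate-then-backward-extract, for any clean accumulator
lemma goA_eq_goB (cs : List Char) : ∀ (d : Int) (cur : List Char),
    (∀ c ∈ cur, c ≠ '|' ∧ c ≠ '[' ∧ c ≠ ']') →
    extractCaptionGoA cs d cur =
      (match extractCaptionFindCut cs d 0 with
       | none => ([] : List Char)
       | some j => (extractCaptionGoB ((cs.take j).reverse ++ cur.reverse) []).reverse) := by
  induction cs with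
  | nil => intro d cur _; simp [extractCaptionGoA, extractCaptionFindCut]
  | cons c cs ih =>
    intro d cur hcur
    by_cases h1 : c = ']'
    · by_cases h3 : d - 1 = 0
      · have hne : c ≠ '[' := by simp [h1]
        simp only [extractCaptionGoA, extractCaptionFindCut, if_neg hne, if_pos h1, if_pos h3]
        simp only [List.take_zero, List.reverse_nil, List.nil_append]
        rw [goB_plain cur.reverse [] (fun c hc => hcur c (by simpa using hc))]
        simp
      · have hne : c ≠ '[' := by simp [h1]
        simp only [extractCaptionGoA, extractCaptionFindCut, if_neg hne, if_pos h1, if_neg h3]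
        rw [findCut_shift cs (d - 1) 1, ih (d - 1) cur hcur]
        cases extractCaptionFindCut cs (d - 1) 0 with
        | none => simp
        | some j =>
          simp only [Option.map_some]
          rw [List.take_succ_cons, List.reverse_cons, List.append_assoc]
          simp only [List.singleton_append]
          rw [goB_skip c (Or.inr h1) _ _ _]
    · by_cases h2 : c = '['
      · simp only [extractCaptionGoA, if_neg h1, extractCaptionFindCut, if_pos h2]
        rw [findCut_shift cs (d + 1) 1, ih (d + 1) cur hcur]
        cases extractCaptionFindCut cs (d + 1) 0 with
        | none => simp
        | some j =>
          simp only [Option.map_some]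
          rw [List.take_succ_cons, List.reverse_cons, List.append_assoc]
          simp only [List.singleton_append]
          rw [goB_skip c (Or.inl h2) _ _ _]
      · by_cases h4 : c = '|'
        · simp only [extractCaptionGoA, if_pos h4, extractCaptionFindCut, if_neg h2, if_neg h1]
          rw [findCut_shift cs d 1, ih d [] (by simp)]
          cases extractCaptionFindCut cs d 0 with
          | none => simp
          | some j =>
            simp only [Option.map_some]
            rw [List.take_succ_cons, List.reverse_cons, h4, List.append_assoc]
            simp only [List.singleton_append]
            rw [goB_bar _ _ _]
            simp
        · simp only [extractCaptionGoA, if_neg h4, extractCaptionFindCut, if_neg h2, if_neg h1]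
          rw [findCut_shift cs d 1,
            ih d (cur ++ [c]) (by
              intro x hx
              rcases List.mem_append.mp hx with h | h
              · exact hcur x h
              · simp only [List.mem_singleton] at h
                subst h; exact ⟨h4, h2, h1⟩)]
          cases extractCaptionFindCut cs d 0 with
          | none => simp
          | some j =>
            simp only [Option.map_some]
            rw [List.take_succ_cons, List.reverse_cons, List.append_assoc]
            simp

-- ===== VERDICT (by name: the statement is the Claim_ definition above) =====
theorem extract_caption_spec : Claim_equal_extract_caption := by
  intro line _
  unfold Spec_extract_caption extract_caption extract_caption_alt
  rw [goA_eq_goB line.toList 2 [] (by simp)]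
  cases h : extractCaptionFindCut line.toList 2 0 with
  | none => rfl
  | some cut =>
    simp only [PySem.List.slice_to_natCast, List.reverse_nil, List.append_nil]
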